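-- pv_equiv track=rewrite | github.com/Enjef/Algo | 2300 - 2399/2302 - Count Subarrays With Score Less Than K/2302 - Count Subarrays With Score Less Than K.py | countSubarrays_best_memory
-- ===== SOURCE A (Python) =====
-- from typing import List
--
-- def countSubarrays_best_memory(nums: List[int], k: int) -> int:
--     n = len(nums)
--     ps = [0]
--     for num in nums:
--         ps.append(ps[-1] + num)
--     ans = 0
--     for l in range(n):
--         lo, hi = l, n + 1
--         while hi - lo > 1:
--             mi = lo + hi >> 1
--             if (ps[mi] - ps[l]) * (mi - l) < k:
--                 lo = mi
--             else:
--                 hi = mi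
--         ans += lo - l
--     return ans
-- ===== SOURCE B (Python) =====
-- from typing import List
--
-- def countSubarrays_best_memory(nums: List[int], k: int) -> int:
--     # Level-synchronous ("offline") binary search: every left endpoint's
--     # search interval advances one level per round over a shared state list,
--     # instead of finishing one binary search before starting the next.
--     n = len(nums)
--     ps = [0]
--     s = 0
--     for x in nums:
--         s += x
--         ps.append(s)
--     states = [(l, l, n + 1) for l in range(n)]
--     while any(hi - lo > 1 for _, lo, hi in states):
--         new = []
--         for l, lo, hi in states:
--             if hi - lo > 1:
--                 mi = (lo + hi) // 2
--                 if (ps[mi] - ps[l]) * (mi - l) < k: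
--                     lo = mi
--                 else:
--                     hi = mi
--             new.append((l, lo, hi))
--         states = new
--     return sum(lo - l for l, lo, _ in states)
-- ===== Notes on version B (the rewrite author's own statement) =====
-- stated objective: alternative
-- what changed: B replaces A's per-left-endpoint while-loop binary searches (each run to completion over a prefix-sum array built by repeated ps[-1] access) with a level-synchronous offline binary search: a list of (l, lo, hi) interval states that all advance one bisection level per round until none is active, summed at the end.
import Mathlib
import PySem

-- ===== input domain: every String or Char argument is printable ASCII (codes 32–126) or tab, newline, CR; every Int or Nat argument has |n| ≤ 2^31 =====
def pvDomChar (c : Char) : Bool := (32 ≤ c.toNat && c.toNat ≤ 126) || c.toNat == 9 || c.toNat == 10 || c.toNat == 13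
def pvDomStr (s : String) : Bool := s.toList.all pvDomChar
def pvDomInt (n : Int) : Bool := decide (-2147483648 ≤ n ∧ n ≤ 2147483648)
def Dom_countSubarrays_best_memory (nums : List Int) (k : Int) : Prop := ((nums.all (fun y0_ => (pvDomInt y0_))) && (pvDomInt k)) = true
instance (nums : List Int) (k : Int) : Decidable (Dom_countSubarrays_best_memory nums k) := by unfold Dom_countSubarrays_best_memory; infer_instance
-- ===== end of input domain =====

-- B reorganises A's independent binary searches level-synchronously (an "offline" binary search
-- over a list of interval states); same results on every input, similar cost (objective: alternative).

-- Python's `x >> 1` is Lean's `x >>> (1 : Nat)`, which equals floor division by 2 (used by the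
-- termination arguments of both ports).
theorem pvShiftRightOne (a : Int) : a >>> (1 : Nat) = PySem.Int.floordiv a 2 := by
  rw [Int.shiftRight_eq_div_pow, PySem.Int.floordiv_eq_ediv_of_pos (by norm_num)]
  norm_num

-- strict midpoint bounds for the bisection step (termination of both ports)
theorem pvMidBounds (lo hi : Int) (h : 1 < hi - lo) :
    lo < PySem.Int.floordiv (lo + hi) 2 ∧ PySem.Int.floordiv (lo + hi) 2 < hi := by
  rw [PySem.Int.floordiv_eq_ediv_of_pos (by norm_num)]
  omega

-- ===== PORT A =====
-- ps = [0]; for num in nums: ps.append(ps[-1] + num)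
-- ps is never empty, so ps[-1] never raises and pyGet?'s `.getD 0` default is never used (exact).
def pvPsA (nums : List Int) : List Int :=
  nums.foldl (fun ps num => ps ++ [(PySem.List.pyGet? ps (-1)).getD 0 + num]) [0]

-- the `while hi - lo > 1` bisection of A, for one left endpoint l; all index accesses are in
-- range whenever A's are, so `.getD 0` is never used on inputs A accepts (exact).
def pvBsA (ps : List Int) (k l : Int) (lo hi : Int) : Int :=
  if h : 1 < hi - lo then
    let mi := (lo + hi) >>> (1 : Nat)
    if ((PySem.List.pyGet? ps mi).getD 0 - (PySem.List.pyGet? ps l).getD 0) * (mi - l) < k then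
      pvBsA ps k l mi hi
    else
      pvBsA ps k l lo mi
  else lo
termination_by (hi - lo).toNat
decreasing_by
  · have hb := pvMidBounds lo hi h; rw [← pvShiftRightOne] at hb; omega
  · have hb := pvMidBounds lo hi h; rw [← pvShiftRightOne] at hb; omega

def countSubarrays_best_memory (nums : List Int) (k : Int) : Int :=
  let n : Int := (nums.length : Int)
  let ps := pvPsA nums
  (PySem.List.pyRange 0 n 1).foldl (fun ans l => ans + (pvBsA ps k l l (n + 1) - l)) 0

-- ===== PORT B =====
-- ps = [0]; s = 0; for x in nums: s += x; ps.append(s)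
def pvPsB (nums : List Int) : List Int :=
  (nums.foldl (fun (p : List Int × Int) x => (p.1 ++ [p.2 + x], p.2 + x)) ([0], 0)).1

-- one round-step of one state (l, lo, hi): the body of Source B's inner for-loop
def pvStep (ps : List Int) (k : Int) (s : Int × Int × Int) : Int × Int × Int :=
  if 1 < s.2.2 - s.2.1 then
    let mi := PySem.Int.floordiv (s.2.1 + s.2.2) 2
    if ((PySem.List.pyGet? ps mi).getD 0 - (PySem.List.pyGet? ps s.1).getD 0) * (mi - s.1) < k then
      (s.1, mi, s.2.2)
    else
      (s.1, s.2.1, mi)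
  else s

def pvGap (s : Int × Int × Int) : Nat := (s.2.2 - s.2.1).toNat

theorem pvStep_gap_le (ps : List Int) (k : Int) (s : Int × Int × Int) :
    pvGap (pvStep ps k s) ≤ pvGap s := by
  obtain ⟨l, lo, hi⟩ := s
  by_cases h1 : 1 < hi - lo
  · have hm := pvMidBounds lo hi h1
    simp only [pvStep, pvGap, h1, if_true]
    split_ifs <;> simp <;> omega
  · simp [pvStep, pvGap, h1]

theorem pvStep_gap_lt (ps : List Int) (k : Int) (s : Int × Int × Int)
    (h : 1 < s.2.2 - s.2.1) : pvGap (pvStep ps k s) < pvGap s := by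
  obtain ⟨l, lo, hi⟩ := s
  simp only at h
  have hm := pvMidBounds lo hi h
  simp only [pvStep, pvGap, h, if_true]
  split_ifs <;> simp <;> omega

theorem pvSum_le (ps : List Int) (k : Int) (sts : List (Int × Int × Int)) :
    ((sts.map (pvStep ps k)).map pvGap).sum ≤ (sts.map pvGap).sum := by
  induction sts with
  | nil => simp
  | cons b u ihu =>
    simp only [List.map_cons, List.sum_cons]
    exact Nat.add_le_add (pvStep_gap_le ps k b) ihu

theorem pvSum_lt (ps : List Int) (k : Int) (sts : List (Int × Int × Int))
    (h : sts.any (fun s => decide (1 < s.2.2 - s.2.1)) = true) :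
    ((sts.map (pvStep ps k)).map pvGap).sum < (sts.map pvGap).sum := by
  induction sts with
  | nil => simp at h
  | cons a t ih =>
    simp only [List.any_cons, Bool.or_eq_true, decide_eq_true_eq] at h
    simp only [List.map_cons, List.sum_cons]
    rcases h with h | h
    · have h1 := pvStep_gap_lt ps k a h
      have h2 := pvSum_le ps k t
      omega
    · have h1 := pvStep_gap_le ps k a
      have h2 := ih (by simpa using h)
      omega

-- Source B's `while any(...)` loop: one synchronized bisection level per round
def pvRounds (ps : List Int) (k : Int) (sts : List (Int × Int × Int)) : List (Int × Int × Int) :=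
  if h : sts.any (fun s => decide (1 < s.2.2 - s.2.1)) = true then
    pvRounds ps k (sts.map (pvStep ps k))
  else sts
termination_by (sts.map pvGap).sum
decreasing_by simpa using pvSum_lt ps k sts h

def countSubarrays_best_memory_alt (nums : List Int) (k : Int) : Int :=
  let n : Int := (nums.length : Int)
  let ps := pvPsB nums
  let fin := pvRounds ps k ((PySem.List.pyRange 0 n 1).map (fun l => (l, l, n + 1)))
  fin.foldl (fun acc s => acc + (s.2.1 - s.1)) 0

-- ===== PRECONDITION & SPEC =====
def Spec_countSubarrays_best_memory (nums : List Int) (k : Int) (out : Int) : Prop := out = countSubarrays_best_memory_alt nums k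
instance (nums : List Int) (k : Int) (out : Int) : Decidable (Spec_countSubarrays_best_memory nums k out) := by unfold Spec_countSubarrays_best_memory; infer_instance

-- ===== CLAIM (what is proved, stated in full; the proofs are below) =====
def Claim_equal_countSubarrays_best_memory : Prop := ∀ (nums : List Int) (k : Int), Dom_countSubarrays_best_memory nums k → Spec_countSubarrays_best_memory nums k (countSubarrays_best_memory nums k)

-- ===== LEMMAS AND PROOFS =====

-- iterate pvStep on a single state until its interval is closed (proof device)
def pvFix (ps : List Int) (k : Int) (s : Int × Int × Int) : Int × Int × Int :=
  if h : 1 < s.2.2 - s.2.1 then pvFix ps k (pvStep ps k s) else s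
termination_by pvGap s
decreasing_by exact pvStep_gap_lt ps k s h

theorem pvStep_fst (ps : List Int) (k : Int) (s : Int × Int × Int) :
    (pvStep ps k s).1 = s.1 := by
  obtain ⟨l, lo, hi⟩ := s
  dsimp only [pvStep]
  split_ifs <;> rfl

theorem pvStep_eq_true (ps : List Int) (k l lo hi : Int) (h : 1 < hi - lo)
    (hp : ((PySem.List.pyGet? ps (PySem.Int.floordiv (lo + hi) 2)).getD 0 -
        (PySem.List.pyGet? ps l).getD 0) * (PySem.Int.floordiv (lo + hi) 2 - l) < k) :
    pvStep ps k (l, lo, hi) = (l, PySem.Int.floordiv (lo + hi) 2, hi) := by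
  dsimp only [pvStep]
  rw [if_pos h, if_pos hp]

theorem pvStep_eq_false (ps : List Int) (k l lo hi : Int) (h : 1 < hi - lo)
    (hp : ¬ ((PySem.List.pyGet? ps (PySem.Int.floordiv (lo + hi) 2)).getD 0 -
        (PySem.List.pyGet? ps l).getD 0) * (PySem.Int.floordiv (lo + hi) 2 - l) < k) :
    pvStep ps k (l, lo, hi) = (l, lo, PySem.Int.floordiv (lo + hi) 2) := by
  dsimp only [pvStep]
  rw [if_pos h, if_neg hp]

theorem pvFix_step (ps : List Int) (k : Int) (s : Int × Int × Int) :
    pvFix ps k (pvStep ps k s) = pvFix ps k s := by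
  by_cases h : 1 < s.2.2 - s.2.1
  · conv_rhs => rw [pvFix]
    rw [dif_pos h]
  · have hs : pvStep ps k s = s := by
      obtain ⟨l, lo, hi⟩ := s
      dsimp only [pvStep]
      rw [if_neg (by simpa using h)]
    rw [hs]

theorem pvRounds_eq_map (ps : List Int) (k : Int) (sts : List (Int × Int × Int)) :
    pvRounds ps k sts = sts.map (pvFix ps k) := by
  induction sts using pvRounds.induct ps k with
  | case1 sts h ih =>
    have ih' : pvRounds ps k (List.map (pvStep ps k) sts)
        = List.map (pvFix ps k) (List.map (pvStep ps k) sts) := by simpa using ih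
    rw [pvRounds, dif_pos h, ih', List.map_map]
    exact List.map_congr_left (fun s _ => pvFix_step ps k s)
  | case2 sts h =>
    rw [pvRounds, dif_neg h]
    have hall : ∀ s ∈ sts, ¬ 1 < s.2.2 - s.2.1 := by
      intro s hs hgt
      exact h (List.any_eq_true.mpr ⟨s, hs, by simpa using hgt⟩)
    conv_lhs => rw [← List.map_id sts]
    exact List.map_congr_left (fun s hs => by
      show s = pvFix ps k s
      rw [pvFix, dif_neg (hall s hs)])

theorem pvFix_fst (ps : List Int) (k : Int) (s : Int × Int × Int) :
    (pvFix ps k s).1 = s.1 := by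
  induction s using pvFix.induct ps k with
  | case1 s h ih =>
    rw [pvFix, dif_pos h, ih, pvStep_fst]
  | case2 s h =>
    rw [pvFix, dif_neg h]

theorem pvBsA_eq_fix (ps : List Int) (k l : Int) : ∀ (lo hi : Int),
    pvBsA ps k l lo hi = (pvFix ps k (l, lo, hi)).2.1 := by
  intro lo hi
  induction lo, hi using pvBsA.induct ps k l with
  | case1 lo hi h mi hlt ih =>
    have hmi : mi = PySem.Int.floordiv (lo + hi) 2 := pvShiftRightOne (lo + hi)
    rw [hmi] at hlt ih
    rw [pvBsA, dif_pos h]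
    dsimp only
    rw [pvShiftRightOne, if_pos hlt, ih]
    conv_rhs => rw [pvFix, dif_pos (show 1 < (l, lo, hi).2.2 - (l, lo, hi).2.1 from h)]
    rw [pvStep_eq_true ps k l lo hi h hlt]
  | case2 lo hi h mi hlt ih =>
    have hmi : mi = PySem.Int.floordiv (lo + hi) 2 := pvShiftRightOne (lo + hi)
    rw [hmi] at hlt ih
    rw [pvBsA, dif_pos h]
    dsimp only
    rw [pvShiftRightOne, if_neg hlt, ih]
    conv_rhs => rw [pvFix, dif_pos (show 1 < (l, lo, hi).2.2 - (l, lo, hi).2.1 from h)]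
    rw [pvStep_eq_false ps k l lo hi h hlt]
  | case3 lo hi h =>
    rw [pvBsA, dif_neg h, pvFix, dif_neg (show ¬ 1 < (l, lo, hi).2.2 - (l, lo, hi).2.1 from h)]

theorem pvPs_aux (xs : List Int) :
    ∀ (acc : List Int) (s : Int), PySem.List.pyGet? acc (-1) = some s →
      xs.foldl (fun ps num => ps ++ [(PySem.List.pyGet? ps (-1)).getD 0 + num]) acc
        = (xs.foldl (fun (p : List Int × Int) x => (p.1 ++ [p.2 + x], p.2 + x)) (acc, s)).1 := by
  induction xs with
  | nil => intro acc s _; rfl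
  | cons x t ih =>
    intro acc s h
    simp only [List.foldl_cons, h, Option.getD_some]
    exact ih (acc ++ [s + x]) (s + x) (PySem.List.pyGet?_neg_one_append_singleton acc (s + x))

theorem pvPs_eq (nums : List Int) : pvPsA nums = pvPsB nums := by
  unfold pvPsA pvPsB
  exact pvPs_aux nums [0] 0 (by decide)

-- ===== VERDICT (by name: the statement is the Claim_ definition above) =====
theorem countSubarrays_best_memory_spec : Claim_equal_countSubarrays_best_memory := by
  intro nums k _
  unfold Spec_countSubarrays_best_memory countSubarrays_best_memory countSubarrays_best_memory_alt
  dsimp only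
  rw [pvPs_eq, pvRounds_eq_map, List.map_map, List.foldl_map]
  congr 1
  funext ans l
  dsimp only [Function.comp]
  rw [pvBsA_eq_fix, pvFix_fst]
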